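-- pv_equiv track=rewrite | github.com/grzes5003/MethamorphicCoder | analyze_r2/cmp_opcode2.py | compare_opcodes
-- ===== SOURCE A (Python) =====
-- from collections import defaultdict
--
-- def compare_opcodes(opcodes_X, opcodes_Y):
--     matches = defaultdict(list)
--     for i in range(len(opcodes_X) - 2):
--         subseq_X = tuple(opcodes_X[i:i+3])
--         for j in range(len(opcodes_Y) - 2):
--             subseq_Y = tuple(opcodes_Y[j:j+3])
--             if subseq_X == subseq_Y:
--                 matches[subseq_X].append((i, j))
--     return matches
-- ===== SOURCE B (Python) =====
-- from collections import defaultdict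
--
-- def compare_opcodes(opcodes_X, opcodes_Y):
--     # Index Y's 3-grams once, then a single pass over X with a dict lookup.
--     index = defaultdict(list)
--     for j in range(len(opcodes_Y) - 2):
--         index[tuple(opcodes_Y[j:j+3])].append(j)
--     matches = defaultdict(list)
--     for i in range(len(opcodes_X) - 2):
--         g = tuple(opcodes_X[i:i+3])
--         js = index.get(g, [])
--         if js:
--             matches[g].extend((i, j) for j in js)
--     return matches
-- ===== Notes on version B (the rewrite author's own statement) =====
-- stated objective: alternative
-- what changed: B builds a dict index of Y's 3-grams (gram -> list of j positions) in one pass and then does a single lookup per position i of X, replacing A's rescan of all of Y for every i; measured about 1.2x faster on match-dense inputs (not >=1.5x, so no speed claim).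
import Mathlib
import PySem

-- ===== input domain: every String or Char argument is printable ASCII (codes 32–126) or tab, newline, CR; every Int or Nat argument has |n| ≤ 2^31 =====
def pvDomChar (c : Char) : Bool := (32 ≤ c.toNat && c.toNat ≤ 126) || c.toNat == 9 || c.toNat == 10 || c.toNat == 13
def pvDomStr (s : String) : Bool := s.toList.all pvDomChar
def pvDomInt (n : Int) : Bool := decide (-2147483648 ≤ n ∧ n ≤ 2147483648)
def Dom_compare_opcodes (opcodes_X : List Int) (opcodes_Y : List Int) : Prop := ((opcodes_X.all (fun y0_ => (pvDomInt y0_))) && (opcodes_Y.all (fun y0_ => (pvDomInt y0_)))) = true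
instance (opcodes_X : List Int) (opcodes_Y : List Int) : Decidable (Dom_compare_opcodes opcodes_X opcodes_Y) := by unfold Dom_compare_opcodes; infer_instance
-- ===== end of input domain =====

-- B replaces A's nested scan (rescanning Y for every i) by a one-pass dict index of Y's 3-grams plus one lookup per i; same values, same insertion order.

-- ===== PORT A =====
def compare_opcodes (opcodes_X : List Int) (opcodes_Y : List Int) : List (List Int × List (Int × Int)) :=
  let matchesD : PySem.Dict (List Int) (List (Int × Int)) :=
    (PySem.List.pyRange 0 ((opcodes_X.length : Int) - 2) 1).foldl (fun d i =>
      let subseq_X := PySem.List.slice opcodes_X (some i) (some (i + 3))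
      (PySem.List.pyRange 0 ((opcodes_Y.length : Int) - 2) 1).foldl (fun d j =>
        let subseq_Y := PySem.List.slice opcodes_Y (some j) (some (j + 3))
        if subseq_X = subseq_Y then d.modify subseq_X [] (· ++ [(i, j)]) else d) d)
      PySem.Dict.empty
  matchesD.items

-- ===== PORT B =====
def compare_opcodes_alt (opcodes_X : List Int) (opcodes_Y : List Int) : List (List Int × List (Int × Int)) :=
  let index : PySem.Dict (List Int) (List Int) :=
    (PySem.List.pyRange 0 ((opcodes_Y.length : Int) - 2) 1).foldl
      (fun d j => d.modify (PySem.List.slice opcodes_Y (some j) (some (j + 3))) [] (· ++ [j]))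
      PySem.Dict.empty
  let matchesD : PySem.Dict (List Int) (List (Int × Int)) :=
    (PySem.List.pyRange 0 ((opcodes_X.length : Int) - 2) 1).foldl (fun d i =>
      let g := PySem.List.slice opcodes_X (some i) (some (i + 3))
      let js := (index.get? g).getD []
      if js.isEmpty then d else d.modify g [] (· ++ js.map (fun j => (i, j))))
      PySem.Dict.empty
  matchesD.items

-- ===== PRECONDITION & SPEC =====
def Spec_compare_opcodes (opcodes_X : List Int) (opcodes_Y : List Int) (out : List (List Int × List (Int × Int))) : Prop := out = compare_opcodes_alt opcodes_X opcodes_Y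
instance (opcodes_X : List Int) (opcodes_Y : List Int) (out : List (List Int × List (Int × Int))) : Decidable (Spec_compare_opcodes opcodes_X opcodes_Y out) := by unfold Spec_compare_opcodes; infer_instance

-- ===== CLAIM (what is proved, stated in full; the proofs are below) =====
def Claim_equal_compare_opcodes : Prop := ∀ (opcodes_X : List Int) (opcodes_Y : List Int), Dom_compare_opcodes opcodes_X opcodes_Y → Spec_compare_opcodes opcodes_X opcodes_Y (compare_opcodes opcodes_X opcodes_Y)

-- ===== LEMMAS AND PROOFS =====

-- inserting twice under the same key is a single insert
theorem pv_insert_insert {κ ν : Type} [BEq κ] [LawfulBEq κ] (d : PySem.Dict κ ν) (k : κ) (v w : ν) :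
    (d.insert k v).insert k w = d.insert k w := by
  apply PySem.Dict.ext
  rw [PySem.Dict.items_insert_of_contains _ w (PySem.Dict.contains_insert_self d k v)]
  rw [PySem.Dict.items_insert, PySem.Dict.items_insert]
  split
  · simp only [List.map_map]
    apply List.map_congr_left; intro p hp
    by_cases h : p.1 == k <;> simp [h, Function.comp]
  · rename_i hc
    simp only [List.map_append]
    have : List.map (fun p => if (p.1 == k) = true then (k, w) else p) d.items = List.map id d.items := by
      apply List.map_congr_left; intro p hp
      have hk : p.1 ∈ d.keys := PySem.Dict.mem_keys_of_mem_items d hp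
      by_cases h : p.1 == k
      · exact absurd ((PySem.Dict.contains_iff_mem_keys d k).mpr (by simpa [eq_of_beq h] using hk)) hc
      · simp [h]
    simp [this]

-- a nonempty run of append-modifies under one key is one append-modify
theorem pv_modify_fold {κ : Type} [BEq κ] [LawfulBEq κ] (g : κ) (f : Int → Int × Int) :
    ∀ (l : List Int) (d : PySem.Dict κ (List (Int × Int))), l ≠ [] →
    l.foldl (fun d j => d.modify g [] (· ++ [f j])) d = d.modify g [] (· ++ l.map f) := by
  intro l
  induction l with
  | nil => intro d h; simp at h
  | cons x t ih =>
    intro d _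
    rw [List.foldl_cons]
    by_cases ht : t = []
    · subst ht; simp [PySem.Dict.modify]
    · rw [ih _ ht]
      simp only [PySem.Dict.modify, PySem.Dict.getD_insert_self, pv_insert_insert, List.map_cons]
      simp

-- B's index characterised: looking up a gram gives exactly the matching j's, in order
theorem pv_index_getD (Y : List Int) (g : List Int) :
    (((PySem.List.pyRange 0 ((Y.length : Int) - 2) 1).foldl
      (fun d j => d.modify (PySem.List.slice Y (some j) (some (j + 3))) [] (· ++ [j]))
      PySem.Dict.empty).getD g []) =
    (PySem.List.pyRange 0 ((Y.length : Int) - 2) 1).filter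
      (fun j => PySem.List.slice Y (some j) (some (j + 3)) == g) := by
  have hmap := List.foldl_map (f := fun j : Int => (PySem.List.slice Y (some j) (some (j + 3)), j))
    (g := fun (d : PySem.Dict (List Int) (List Int)) (p : List Int × Int) => d.modify p.1 [] (· ++ [p.2]))
    (l := PySem.List.pyRange 0 ((Y.length : Int) - 2) 1) (init := PySem.Dict.empty)
  rw [show (fun (d : PySem.Dict (List Int) (List Int)) (j : Int) =>
        d.modify (PySem.List.slice Y (some j) (some (j + 3))) [] (· ++ [j]))
      = (fun d j => d.modify (PySem.List.slice Y (some j) (some (j + 3)), j).1 []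
          (· ++ [(PySem.List.slice Y (some j) (some (j + 3)), j).2])) from rfl]
  rw [← hmap]
  rw [PySem.Dict.getD_foldl_modify_append]
  simp [List.filter_map, List.map_map, Function.comp_def]

-- A's inner loop equals B's lookup-and-extend step, for every accumulator and i
theorem pv_step_eq (X Y : List Int) (i : Int) (d : PySem.Dict (List Int) (List (Int × Int))) :
    (PySem.List.pyRange 0 ((Y.length : Int) - 2) 1).foldl (fun d j =>
        if PySem.List.slice X (some i) (some (i + 3)) = PySem.List.slice Y (some j) (some (j + 3))
        then d.modify (PySem.List.slice X (some i) (some (i + 3))) [] (· ++ [(i, j)]) else d) d =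
    (let g := PySem.List.slice X (some i) (some (i + 3))
     let js := ((((PySem.List.pyRange 0 ((Y.length : Int) - 2) 1).foldl
        (fun d j => d.modify (PySem.List.slice Y (some j) (some (j + 3))) [] (· ++ [j]))
        PySem.Dict.empty)).get? g).getD []
     if js.isEmpty then d else d.modify g [] (· ++ js.map (fun j => (i, j)))) := by
  simp only [← PySem.Dict.getD_eq_get?_getD, pv_index_getD]
  set g := PySem.List.slice X (some i) (some (i + 3)) with hg
  rw [PySem.List.foldl_ite_eq_foldl_filter]
  have hf : (PySem.List.pyRange 0 ((Y.length : Int) - 2) 1).filter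
        (fun j => decide (g = PySem.List.slice Y (some j) (some (j + 3))))
      = (PySem.List.pyRange 0 ((Y.length : Int) - 2) 1).filter
        (fun j => PySem.List.slice Y (some j) (some (j + 3)) == g) := by
    apply List.filter_congr; intro j _
    by_cases h : PySem.List.slice Y (some j) (some (j + 3)) = g
    · simp [h]
    · simp [h, Ne.symm h]
  rw [hf]
  by_cases hE : (PySem.List.pyRange 0 ((Y.length : Int) - 2) 1).filter
      (fun j => PySem.List.slice Y (some j) (some (j + 3)) == g) = []
  · simp [hE]
  · rw [pv_modify_fold g (fun j => (i, j)) _ d hE]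
    simp [hE, List.isEmpty_iff]

-- ===== VERDICT (by name: the statement is the Claim_ definition above) =====
theorem compare_opcodes_spec : Claim_equal_compare_opcodes := by
  intro X Y _
  unfold Spec_compare_opcodes compare_opcodes compare_opcodes_alt
  dsimp only
  congr 1
  apply PySem.List.foldl_congr_mem
  intro d i _
  exact pv_step_eq X Y i d
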